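-- pv_equiv track=rewrite | github.com/garytbaker/C200_Assignments | Assignment4.py/MathFunctions.py | eWhileLoop
-- ===== SOURCE A (Python) =====
-- def eWhileLoop(n):
--     if n == 0:
--         return 1
--     total = 1
--     counter = 0
--     while counter < n:
--         total *= 2
--         total += 2
--         counter = counter + 1
--     return total
-- ===== SOURCE B (Python) =====
-- def eWhileLoop(n):
--     # closed form: the recurrence t -> 2t+2 from 1 gives 3*2^n - 2; n <= 0 runs zero iterations
--     return 1 if n <= 0 else 3 * 2**n - 2
-- ===== Notes on version B (the rewrite author's own statement) =====
-- stated objective: faster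
-- what changed: Replaced the O(n) multiply-and-add loop with the closed form 3*2**n - 2 (1 for n <= 0), using Python's fast exponentiation.
import Mathlib
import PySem

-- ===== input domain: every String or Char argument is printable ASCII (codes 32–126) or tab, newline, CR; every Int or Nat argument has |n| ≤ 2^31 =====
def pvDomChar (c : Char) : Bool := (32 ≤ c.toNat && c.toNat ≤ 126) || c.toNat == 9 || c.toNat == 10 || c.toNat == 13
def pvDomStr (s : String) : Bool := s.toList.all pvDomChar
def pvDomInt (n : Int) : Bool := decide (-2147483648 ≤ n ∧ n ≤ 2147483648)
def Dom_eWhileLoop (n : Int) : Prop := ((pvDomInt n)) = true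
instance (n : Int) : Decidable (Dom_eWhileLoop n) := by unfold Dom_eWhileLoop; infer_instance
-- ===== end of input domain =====

-- B replaces A's O(n) multiply-and-add loop with the closed form 3*2^n - 2 (1 for n ≤ 0): asymptotically faster.


-- ===== PORT A =====
-- the while loop: runs while counter < n, i.e. (n - counter).toNat more iterations; state is `total`
def eLoopA : Nat → Int → Int
  | 0, total => total
  | f + 1, total => eLoopA f (total * 2 + 2)

def eWhileLoop (n : Int) : Int :=
  if n == 0 then 1
  else eLoopA n.toNat 1

-- ===== PORT B =====
def eWhileLoop_alt (n : Int) : Int :=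
  if n ≤ 0 then 1 else 3 * 2 ^ n.toNat - 2

-- ===== PRECONDITION & SPEC =====
def Spec_eWhileLoop (n : Int) (out : Int) : Prop := out = eWhileLoop_alt n
instance (n : Int) (out : Int) : Decidable (Spec_eWhileLoop n out) := by unfold Spec_eWhileLoop; infer_instance

-- ===== CLAIM (what is proved, stated in full; the proofs are below) =====
def Claim_equal_eWhileLoop : Prop := ∀ (n : Int), Dom_eWhileLoop n → Spec_eWhileLoop n (eWhileLoop n)

-- ===== LEMMAS AND PROOFS =====
theorem eLoopA_closed (f : Nat) (t : Int) : eLoopA f t = (t + 2) * 2 ^ f - 2 := by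
  induction f generalizing t with
  | zero => simp [eLoopA]
  | succ k ih =>
      rw [eLoopA, ih]
      ring

-- ===== VERDICT (by name: the statement is the Claim_ definition above) =====
theorem eWhileLoop_spec : Claim_equal_eWhileLoop := by
  intro n _
  unfold Spec_eWhileLoop eWhileLoop eWhileLoop_alt
  rcases lt_trichotomy n 0 with h | h | h
  · have hn0 : n.toNat = 0 := Int.toNat_of_nonpos (le_of_lt h)
    rw [if_neg (by simp; omega), if_pos (le_of_lt h), hn0]
    rfl
  · simp [h]
  · rw [if_neg (by simp; omega), if_neg (not_le.mpr h), eLoopA_closed]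
    ring
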